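-- pv_equiv track=rewrite | github.com/NOGEORGIY/HardCore-MP | step3.py | replace_numbers_with_letters
-- ===== SOURCE A (Python) =====
-- replacement_map = {
--     '12': 'a', '13': 'b', '14': 'c', '15': 'd', '16': 'e', '17': 'f', '18': 'g', '19': 'h',
--     '21': 'i', '22': 'j', '23': 'k', '24': 'l', '25': 'm', '26': 'n', '27': 'o', '28': 'p', '29': 'q',
--     '31': 'r', '32': 's', '33': 't', '34': 'u', '35': 'v', '36': 'w', '37': 'x', '38': 'y', '39': 'z',
--     '41': 'A', '42': 'B', '43': 'C', '44': 'D', '45': 'E', '46': 'F', '47': 'G', '48': 'H', '49': 'I',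
--     '51': 'J', '52': 'K', '53': 'L', '54': 'M', '55': 'N', '56': 'O', '57': 'P', '58': 'Q', '59': 'R',
--     '61': 'S', '62': 'T', '63': 'U', '64': 'V', '65': 'W', '66': 'X', '67': 'Y', '68': 'Z', '69': 'а',
--     '71': 'б', '72': 'в', '73': 'г', '74': 'д', '75': 'е', '76': 'ж', '77': 'з', '78': 'и', '79': 'й',
--     '81': '!', '82': '@', '83': '#', '84': '$', '85': '%', '86': '^', '87': '&', '88': '*', '89': '(',
--     '91': ')', '92': '-', '93': '_', '94': '=', '95': '+', '96': '[', '97': ']', '98': '{', '99': '}'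
-- }
--
-- def replace_numbers_with_letters(s):
--     result = []
--     i = 0
--     while i < len(s):
--         if i + 2 <= len(s) and s[i:i+2] in replacement_map:
--             result.append(replacement_map[s[i:i+2]])
--             i += 2
--         else:
--             result.append(s[i])
--             i += 1
--     return ''.join(result)
-- ===== SOURCE B (Python) =====
-- # Run-based re-implementation: the string is cut into maximal runs of the code
-- # digits 1-9; each run is decoded without any per-window dictionary test, by
-- # handling whole blocks of leading '1's in closed form (a block of k '1's
-- # followed by another digit yields k-1 literal '1's plus one code) and mapping
-- # every code arithmetically into a constant alphabet. Non-digit characters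
-- # (including '0') are copied through untouched.
-- _ALPHABET = "abcdefghijklmnopqrstuvwxyzABCDEFGHIJKLMNOPQRSTUVWXYZ\u0430\u0431\u0432\u0433\u0434\u0435\u0436\u0437\u0438\u0439!@#$%^&*()-_=+[]{}"
--
--
-- def _decode_run(run):
--     # `run` consists solely of digits '1'..'9'
--     out = []
--     while run:
--         if run[0] == '1':
--             stripped = run.lstrip('1')
--             if not stripped:
--                 out.append(run)       # run of only '1's: no pair is a code
--                 break
--             ones = len(run) - len(stripped)
--             out.append('1' * (ones - 1))
--             out.append(_ALPHABET[ord(stripped[0]) - 50])   # code '1d'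
--             run = stripped[1:]
--         elif len(run) == 1:
--             out.append(run)
--             break
--         else:
--             d, e = ord(run[0]) - 48, ord(run[1]) - 48
--             out.append(_ALPHABET[(d - 1) * 9 + e - 2])
--             run = run[2:]
--     return ''.join(out)
--
--
-- def replace_numbers_with_letters(s):
--     out = []
--     i = 0
--     n = len(s)
--     while i < n:
--         c = s[i]
--         if '1' <= c <= '9':
--             j = i + 1
--             while j < n and '1' <= s[j] <= '9':
--                 j += 1
--             out.append(_decode_run(s[i:j]))
--             i = j
--         else:
--             out.append(c)
--             i += 1
--     return ''.join(out)
-- ===== Notes on version B (the rewrite author's own statement) =====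
-- stated objective: faster
-- what changed: B replaces A's per-position scan with 2-char slice dictionary lookups by a run-based algorithm: the string is split into maximal runs of the digits 1-9, and each run is decoded with no dictionary at all, consuming whole blocks of leading '1's in closed form (k ones before another digit give k-1 literal ones plus one code) and mapping each code arithmetically into a constant alphabet string.
import Mathlib
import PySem

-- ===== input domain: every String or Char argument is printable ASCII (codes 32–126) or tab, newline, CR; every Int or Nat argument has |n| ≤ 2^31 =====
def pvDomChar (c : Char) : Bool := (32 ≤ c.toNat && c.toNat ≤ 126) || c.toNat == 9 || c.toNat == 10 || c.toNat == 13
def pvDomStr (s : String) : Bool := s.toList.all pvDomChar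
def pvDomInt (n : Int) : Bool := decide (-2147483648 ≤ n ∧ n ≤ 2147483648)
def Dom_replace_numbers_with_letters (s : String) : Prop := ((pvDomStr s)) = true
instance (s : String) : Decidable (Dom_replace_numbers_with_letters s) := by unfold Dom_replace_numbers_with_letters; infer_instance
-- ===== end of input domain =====

-- B replaces A's per-position dictionary scan by a run-based algorithm: the string is split into
-- maximal runs of the digits 1-9 and each run is decoded with no dictionary, consuming blocks of
-- leading '1's in closed form and mapping each code arithmetically into a constant alphabet.

-- ===== PORT A =====
-- the module-level replacement_map dict literal
def rmap : PySem.Dict String String := PySem.Dict.mk [("12", "a"), ("13", "b"), ("14", "c"), ("15", "d"), ("16", "e"), ("17", "f"), ("18", "g"), ("19", "h"), ("21", "i"), ("22", "j"), ("23", "k"), ("24", "l"), ("25", "m"), ("26", "n"), ("27", "o"), ("28", "p"), ("29", "q"), ("31", "r"), ("32", "s"), ("33", "t"), ("34", "u"), ("35", "v"), ("36", "w"), ("37", "x"), ("38", "y"), ("39", "z"), ("41", "A"), ("42", "B"), ("43", "C"), ("44", "D"), ("45", "E"), ("46", "F"), ("47", "G"), ("48", "H"), ("49", "I"), ("51", "J"),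 ("52", "K"), ("53", "L"), ("54", "M"), ("55", "N"), ("56", "O"), ("57", "P"), ("58", "Q"), ("59", "R"), ("61", "S"), ("62", "T"), ("63", "U"), ("64", "V"), ("65", "W"), ("66", "X"), ("67", "Y"), ("68", "Z"), ("69", "а"), ("71", "б"), ("72", "в"), ("73", "г"), ("74", "д"), ("75", "е"), ("76", "ж"), ("77", "з"), ("78", "и"), ("79", "й"), ("81", "!"), ("82", "@"), ("83", "#"), ("84", "$"), ("85", "%"), ("86", "^"), ("87", "&"), ("88", "*"), ("89", "("), ("91", ")"), ("92", "-"), ("93", "_"), ("94", "="), ("95", "+"), ("96", "["), ("97", "]"), ("98", "{"), ("99", "}")]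

-- A's while loop over the characters: two chars left ↔ i + 2 <= len(s)
def goA : List Char → List String
  | [] => []
  | [c] => [String.ofList [c]]
  | c1 :: c2 :: rest =>
    match rmap.get? (String.ofList [c1, c2]) with
    | some v => v :: goA rest
    | none => String.ofList [c1] :: goA (c2 :: rest)

def replace_numbers_with_letters (s : String) : String :=
  PySem.Str.join "" (goA s.toList)

-- ===== PORT B =====
-- the constant _ALPHABET string of Source B
def alphaChars : List Char := "abcdefghijklmnopqrstuvwxyzABCDEFGHIJKLMNOPQRSTUVWXYZабвгдежзий!@#$%^&*()-_=+[]{}".toList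

-- _ALPHABET[(d - 1) * 9 + e - 2] with d = ord(c1)-48, e = ord(c2)-48
def codeChar (c1 c2 : Char) : Char :=
  alphaChars.getD (((c1.toNat - 48) - 1) * 9 + (c2.toNat - 48) - 2) '?'

-- '1' <= c <= '9'
def isDig (c : Char) : Bool := decide ('1' ≤ c) && decide (c ≤ '9')

-- Source B's _decode_run: decode one run of digits 1-9 (run.lstrip('1') = dropWhile (· == '1'))
def decodeRun : List Char → List Char
  | [] => []
  | c :: cs =>
    if c = '1' then
      match _h : (c :: cs).dropWhile (· == '1') with
      | [] => c :: cs
      | d :: rest2 =>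
        List.replicate ((c :: cs).length - (d :: rest2).length - 1) '1' ++
          alphaChars.getD (d.toNat - 50) '?' :: decodeRun rest2
    else
      match cs with
      | [] => [c]
      | e :: r => codeChar c e :: decodeRun r
termination_by l => l.length
decreasing_by
  · have h1 := List.length_dropWhile_le (fun x => x == '1') (c :: cs)
    rw [_h] at h1
    simp at h1 ⊢
    omega
  · simp

-- Source B's main loop: copy non-digits, cut out each maximal digit run and decode it
def splitRuns : List Char → List Char
  | [] => []
  | c :: cs =>
    if isDig c then
      decodeRun (c :: cs.takeWhile isDig) ++ splitRuns (cs.dropWhile isDig)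
    else
      c :: splitRuns cs
termination_by l => l.length
decreasing_by
  · have := List.length_dropWhile_le isDig cs
    simp
    omega
  · simp

def replace_numbers_with_letters_alt (s : String) : String :=
  String.ofList (splitRuns s.toList)

-- ===== PRECONDITION & SPEC =====
def Spec_replace_numbers_with_letters (s : String) (out : String) : Prop := out = replace_numbers_with_letters_alt s
instance (s : String) (out : String) : Decidable (Spec_replace_numbers_with_letters s out) := by unfold Spec_replace_numbers_with_letters; infer_instance

-- ===== CLAIM (what is proved, stated in full; the proofs are below) =====
def Claim_equal_replace_numbers_with_letters : Prop := ∀ (s : String), Dom_replace_numbers_with_letters s → Spec_replace_numbers_with_letters s (replace_numbers_with_letters s)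

-- ===== LEMMAS AND PROOFS =====

-- the exact condition under which a two-char window is a code of the map
def ccond (c1 c2 : Char) : Bool := isDig c1 && isDig c2 && !(c1 == '1' && c2 == '1')

-- character-level description of A's greedy scan
def aChars : List Char → List Char
  | [] => []
  | [c] => [c]
  | c1 :: c2 :: rest =>
    if ccond c1 c2 then codeChar c1 c2 :: aChars rest else c1 :: aChars (c2 :: rest)

-- "the head of l, if any, is not a digit 1-9"
def headNotDig : List Char → Prop
  | [] => True
  | h :: _ => isDig h = false

theorem char_ofNat_of_toNat (c : Char) (n : Nat) (h : c.val.toNat = n) : c = Char.ofNat n := by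
  subst h; simp [Char.ofNat_toNat]

theorem char_mem_nine (c : Char) (h1 : '1' ≤ c) (h2 : c ≤ '9') :
    c ∈ ['1','2','3','4','5','6','7','8','9'] := by
  rw [Char.le_def, UInt32.le_iff_toNat_le] at h1 h2
  have hv1 : 49 ≤ c.val.toNat := h1
  have hv2 : c.val.toNat ≤ 57 := h2
  interval_cases h : c.val.toNat <;> rw [char_ofNat_of_toNat c _ h] <;> decide

theorem lookup_none (c1 c2 : Char)
    (h : ∀ d1 d2 : Char, '1' ≤ d1 ∧ d1 ≤ '9' ∧ '1' ≤ d2 ∧ d2 ≤ '9' → ¬(c1 = d1 ∧ c2 = d2)) :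
    rmap.get? (String.ofList [c1, c2]) = none := by
  rw [PySem.Dict.get?_eq_none_iff_not_mem_keys]
  intro hmem
  have hmem' := List.mem_map_of_mem (f := String.toList) hmem
  have hk : rmap.keys.map String.toList = [['1','2'],['1','3'],['1','4'],['1','5'],['1','6'],['1','7'],['1','8'],['1','9'],['2','1'],['2','2'],['2','3'],['2','4'],['2','5'],['2','6'],['2','7'],['2','8'],['2','9'],['3','1'],['3','2'],['3','3'],['3','4'],['3','5'],['3','6'],['3','7'],['3','8'],['3','9'],['4','1'],['4','2'],['4','3'],['4','4'],['4','5'],['4','6'],['4','7'],['4','8'],['4','9'],['5','1'],['5','2'],['5','3'],['5','4'],['5','5'],['5','6'],['5','7'],['5','8'],['5','9'],['6','1'],['6','2'],['6','3'],['6','4'],['6','5'],['6','6'],['6','7'],['6','8'],['6','9'],['7','1'],['7','2'],['7','3'],['7','4'],['7','5'],['7','6'],['7','7'],['7','8'],['7','9'],['8','1'],['8','2'],['8','3'],['8','4'],['8','5'],['8','6'],['8','7'],['8','8'],['8','9'],['9','1'],['9','2'],['9','3'],['9','4'],['9','5'],['9','6'],['9','7'],['9','8'],['9','9']] := by decide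
  rw [hk] at hmem'
  simp only [String.toList_ofList, List.mem_cons, List.cons.injEq, List.mem_nil_iff,
    or_false, and_true] at hmem'
  rcases hmem' with hp|hp|hp|hp|hp|hp|hp|hp|hp|hp|hp|hp|hp|hp|hp|hp|hp|hp|hp|hp|hp|hp|hp|hp|hp|hp|hp|hp|hp|hp|hp|hp|hp|hp|hp|hp|hp|hp|hp|hp|hp|hp|hp|hp|hp|hp|hp|hp|hp|hp|hp|hp|hp|hp|hp|hp|hp|hp|hp|hp|hp|hp|hp|hp|hp|hp|hp|hp|hp|hp|hp|hp|hp|hp|hp|hp|hp|hp|hp|hp <;> exact h _ _ (by decide) hp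

theorem step (c1 c2 : Char) :
    rmap.get? (String.ofList [c1, c2]) =
      if ccond c1 c2 then some (String.ofList [codeChar c1 c2]) else none := by
  by_cases h1 : '1' ≤ c1 ∧ c1 ≤ '9'
  · by_cases h2 : '1' ≤ c2 ∧ c2 ≤ '9'
    · have m1 := char_mem_nine c1 h1.1 h1.2
      have m2 := char_mem_nine c2 h2.1 h2.2
      fin_cases m1 <;> fin_cases m2 <;> decide
    · have hd2 : isDig c2 = false := by
        simp [isDig]
        intro ha
        exact not_le.mp (fun hb => h2 ⟨ha, hb⟩)
      have hc : ccond c1 c2 = false := by simp [ccond, hd2]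
      rw [if_neg (by simp [hc]), lookup_none]
      intro d1 d2 hd he
      rcases hd with ⟨a1, a2, a3, a4⟩
      exact h2 (he.2 ▸ ⟨a3, a4⟩)
  · have hd1 : isDig c1 = false := by
      simp [isDig]
      intro ha
      exact not_le.mp (fun hb => h1 ⟨ha, hb⟩)
    have hc : ccond c1 c2 = false := by simp [ccond, hd1]
    rw [if_neg (by simp [hc]), lookup_none]
    intro d1 d2 hd he
    rcases hd with ⟨a1, a2, a3, a4⟩
    exact h1 (he.1 ▸ ⟨a1, a2⟩)

theorem join_nil_cons (p : List Char) (rest : List (List Char)) :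
    PySem.Chars.join [] (p :: rest) = p ++ PySem.Chars.join [] rest := by
  cases rest with
  | nil => rw [PySem.Chars.join_singleton, PySem.Chars.join_nil, List.append_nil]
  | cons q r => rw [PySem.Chars.join_cons_cons]; simp

-- A's scan, character level
theorem goA_aChars (cs : List Char) :
    PySem.Chars.join [] ((goA cs).map String.toList) = aChars cs := by
  induction cs using goA.induct with
  | case1 => simp [goA, aChars, PySem.Chars.join_nil]
  | case2 c => simp [goA, aChars, PySem.Chars.join_singleton]
  | case3 c1 c2 rest v hv ih =>
    have hC : ccond c1 c2 = true := by
      by_contra hC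
      rw [step] at hv
      rw [if_neg (by simpa using hC)] at hv
      exact absurd hv (by simp)
    have hv2 := hv
    rw [step, if_pos (by simp [hC])] at hv2
    injection hv2 with hv'
    simp only [goA, hv, List.map_cons, join_nil_cons, ih, aChars, if_pos hC,
      ← hv', String.toList_ofList]
    simp
  | case4 c1 c2 rest hnone ih =>
    have hC : ccond c1 c2 = false := by
      by_contra hC
      rw [step, if_pos (by simpa using hC)] at hnone
      exact absurd hnone (by simp)
    simp only [goA, hnone, List.map_cons, join_nil_cons, ih, String.toList_ofList, aChars]
    rw [if_neg (by simp [hC])]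
    simp

-- a block of '1's followed by nothing the scan can pair with passes through unchanged
theorem aChars_ones (m : Nat) (rest : List Char) (hr : headNotDig rest) :
    aChars (List.replicate m '1' ++ rest) = List.replicate m '1' ++ aChars rest := by
  induction m with
  | zero => simp
  | succ m ih =>
    cases m with
    | zero =>
      cases rest with
      | nil => simp [aChars]
      | cons h t =>
        have hx : isDig h = false := hr
        have hc : ccond '1' h = false := by simp [ccond, hx]
        simp [List.replicate, aChars, hc]
    | succ k =>
      have hc : ccond '1' '1' = false := by decide
      calc aChars (List.replicate (k + 2) '1' ++ rest)
          = aChars ('1' :: '1' :: (List.replicate k '1' ++ rest)) := by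
            simp [List.replicate_succ]
        _ = '1' :: aChars ('1' :: (List.replicate k '1' ++ rest)) := by
            simp [aChars, hc]
        _ = '1' :: aChars (List.replicate (k + 1) '1' ++ rest) := by
            simp [List.replicate_succ]
        _ = List.replicate (k + 2) '1' ++ aChars rest := by
            rw [ih]; simp [List.replicate_succ]

-- a block of '1's followed by another digit: all but the last '1' pass through, then one code
theorem aChars_ones_code (k : Nat) (d : Char) (tail : List Char)
    (hd : isDig d = true) (hd1 : d ≠ '1') :
    aChars (List.replicate k '1' ++ '1' :: d :: tail) =
      List.replicate k '1' ++ codeChar '1' d :: aChars tail := by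
  induction k with
  | zero =>
    have hc : ccond '1' d = true := by
      have hb : '1' ≤ d ∧ d ≤ '9' := by simpa [isDig] using hd
      have hm := char_mem_nine d hb.1 hb.2
      fin_cases hm
      · exact absurd rfl hd1
      all_goals decide
    simp [aChars, hc]
  | succ k ih =>
    have hc : ccond '1' '1' = false := by decide
    calc aChars (List.replicate (k + 1) '1' ++ '1' :: d :: tail)
        = aChars ('1' :: (List.replicate k '1' ++ '1' :: d :: tail)) := by
          simp [List.replicate_succ]
      _ = '1' :: aChars (List.replicate k '1' ++ '1' :: d :: tail) := by
          cases hk : List.replicate k '1' ++ '1' :: d :: tail with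
          | nil => simp at hk
          | cons x xs =>
            have hx : x = '1' := by
              cases k with
              | zero => simp [List.replicate] at hk; exact hk.1.symm
              | succ j => simp [List.replicate_succ] at hk; exact hk.1.symm
            subst hx
            simp [aChars, hc]
      _ = List.replicate (k + 1) '1' ++ codeChar '1' d :: aChars tail := by
          rw [ih]; simp [List.replicate_succ]

theorem code1_eq (d : Char) : alphaChars.getD (d.toNat - 50) '?' = codeChar '1' d := by
  unfold codeChar
  congr 1
  have h1 : ('1' : Char).toNat = 49 := by decide
  rw [h1]
  omega

-- A's scan over (digit run ++ non-digit continuation) is B's run decoder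
theorem runLemma (rest : List Char) (hr : headNotDig rest) :
    ∀ run : List Char, (∀ c ∈ run, isDig c = true) →
      aChars (run ++ rest) = decodeRun run ++ aChars rest := by
  intro run
  induction run using decodeRun.induct with
  | case1 => simp [decodeRun]
  | case2 cs h =>
    intro _
    have hall1 : ∀ x ∈ '1' :: cs, x = '1' := by
      intro x hx
      have := List.dropWhile_eq_nil_iff.mp h x hx
      simpa using this
    have hrep : '1' :: cs = List.replicate ('1' :: cs).length '1' :=
      List.eq_replicate_of_mem hall1
    have hdec : decodeRun ('1' :: cs) = '1' :: cs := by
      rw [decodeRun.eq_def]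
      simp only [reduceIte]
      split
      · rfl
      · rename_i d' rest2' hd
        rw [h] at hd
        exact absurd hd (by simp)
    rw [hdec]
    conv_lhs => rw [hrep]
    rw [aChars_ones _ _ hr, ← hrep]
  | case3 cs d rest2 h ih =>
    intro hall
    have hd' : (d == '1') = false := by
      have hne : ('1' :: cs).dropWhile (fun x => x == '1') ≠ [] := by simp [h]
      simpa [h] using List.head_dropWhile_not (fun x => x == '1') hne
    have hd1 : d ≠ '1' := by simpa using hd'
    have hdmem : d ∈ '1' :: cs := (List.dropWhile_sublist _).mem (by rw [h]; simp)
    have hddig : isDig d = true := hall d hdmem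
    -- decompose the run: '1' :: cs = replicate (k+1) '1' ++ d :: rest2
    have hdw : cs.dropWhile (fun x => x == '1') = d :: rest2 := by
      rw [← h, List.dropWhile_cons_of_pos (by simp)]
    set k := (cs.takeWhile (fun x => x == '1')).length with hk
    have htw : cs.takeWhile (fun x => x == '1') = List.replicate k '1' := by
      apply List.eq_replicate_of_mem
      intro x hx
      simpa using List.mem_takeWhile_imp hx
    have hsplit : '1' :: cs = List.replicate (k + 1) '1' ++ d :: rest2 := by
      conv_lhs => rw [← List.takeWhile_append_dropWhile (p := fun x => x == '1') (l := cs)]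
      rw [htw, hdw, List.replicate_succ]
      simp
    have hrest2 : ∀ x ∈ rest2, isDig x = true := by
      intro x hx
      exact hall x (by rw [hsplit]; simp [hx])
    have hlc : cs.length = k + 1 + rest2.length := by
      have := congrArg List.length hsplit
      simp at this
      omega
    have hdec : decodeRun ('1' :: cs) =
        List.replicate k '1' ++ codeChar '1' d :: decodeRun rest2 := by
      rw [decodeRun.eq_def]
      simp only [reduceIte]
      split
      · rename_i hd
        rw [h] at hd
        exact absurd hd (by simp)
      · rename_i d' rest2' hd
        rw [h] at hd
        injection hd with h1 h2
        subst h1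
        subst h2
        rw [code1_eq]
        congr 2
        simp
        omega
    calc aChars (('1' :: cs) ++ rest)
        = aChars (List.replicate k '1' ++ '1' :: d :: (rest2 ++ rest)) := by
          rw [hsplit, List.replicate_succ']
          simp
      _ = List.replicate k '1' ++ codeChar '1' d :: aChars (rest2 ++ rest) :=
          aChars_ones_code k d _ hddig hd1
      _ = List.replicate k '1' ++ codeChar '1' d :: (decodeRun rest2 ++ aChars rest) := by
          rw [ih hrest2]
      _ = decodeRun ('1' :: cs) ++ aChars rest := by
          rw [hdec]; simp
  | case4 c hc =>
    intro hall
    have hdec : decodeRun [c] = [c] := by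
      rw [decodeRun.eq_def]
      simp [hc]
    rw [hdec]
    cases rest with
    | nil => simp [aChars]
    | cons x t =>
      have hx : isDig x = false := hr
      have hcc : ccond c x = false := by simp [ccond, hx]
      simp [aChars, hcc]
  | case5 c hc e r ih =>
    intro hall
    have hed : isDig e = true := hall e (by simp)
    have hcd : isDig c = true := hall c (by simp)
    have hcc : ccond c e = true := by
      simp [ccond, hcd, hed]
      exact Or.inl hc
    have hrr : ∀ x ∈ r, isDig x = true := fun x hx => hall x (by simp [hx])
    have hdec : decodeRun (c :: e :: r) = codeChar c e :: decodeRun r := by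
      rw [decodeRun.eq_def]
      simp [hc]
    rw [hdec]
    simp [aChars, hcc, ih hrr]

-- headNotDig holds after dropping a digit run
theorem headNotDig_dropWhile (cs : List Char) : headNotDig (cs.dropWhile isDig) := by
  cases h : cs.dropWhile isDig with
  | nil => trivial
  | cons x t =>
    have hne : cs.dropWhile isDig ≠ [] := by simp [h]
    have hx : isDig x = false := by
      simpa [h] using List.head_dropWhile_not isDig hne
    exact hx

-- character level: A's scan = B's run-splitting
theorem aChars_splitRuns (cs : List Char) : aChars cs = splitRuns cs := by
  induction cs using splitRuns.induct with
  | case1 => simp [aChars, splitRuns]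
  | case2 c cs hc ih =>
    have hall : ∀ x ∈ c :: cs.takeWhile isDig, isDig x = true := by
      intro x hx
      rcases List.mem_cons.mp hx with h | h
      · rw [h]; exact hc
      · exact List.mem_takeWhile_imp h
    have hdecomp : c :: cs = (c :: cs.takeWhile isDig) ++ cs.dropWhile isDig := by
      conv_lhs => rw [← List.takeWhile_append_dropWhile (p := isDig) (l := cs)]
      simp
    have hsr : splitRuns (c :: cs) =
        decodeRun (c :: cs.takeWhile isDig) ++ splitRuns (cs.dropWhile isDig) := by
      rw [splitRuns.eq_def]
      simp [hc]
    rw [hsr]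
    conv_lhs => rw [hdecomp]
    rw [runLemma _ (headNotDig_dropWhile cs) _ hall, ih]
  | case3 c cs hc ih =>
    have hcf : isDig c = false := by simpa using hc
    rw [splitRuns.eq_def]
    cases cs with
    | nil => simp [hcf, aChars, splitRuns]
    | cons x t =>
      have hcc : ccond c x = false := by simp [ccond, hcf]
      simp [hcf, aChars, hcc, ih]

-- ===== VERDICT (by name: the statement is the Claim_ definition above) =====
theorem replace_numbers_with_letters_spec : Claim_equal_replace_numbers_with_letters := by
  intro s _
  unfold Spec_replace_numbers_with_letters replace_numbers_with_letters replace_numbers_with_letters_alt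
  rw [String.ext_iff, PySem.Str.toList_join]
  have he : ("" : String).toList = [] := rfl
  rw [he, String.toList_ofList]
  rw [goA_aChars s.toList, aChars_splitRuns]
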